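-- pv_equiv track=rewrite | github.com/chickenThug/STUNDA | public_data/process_bronze_terms.py | no_inflections
-- ===== SOURCE A (Python) =====
-- from collections import defaultdict
--
-- def no_inflections(text):
--     words = text.split()
--
--     seen = defaultdict(lambda: False)
--
--     for word in words:
--         if len(word) == 1:
--             continue
--         else:
--             if seen[word[:2]]:
--                 return False
--             seen[word[:2]] = True
--     return True
-- ===== SOURCE B (Python) =====
-- def no_inflections(text):
--     prefixes = sorted(w[:2] for w in text.split() if len(w) != 1)
--     return all(p != q for p, q in zip(prefixes, prefixes[1:]))
-- ===== Notes on version B (the rewrite author's own statement) =====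
-- stated objective: alternative
-- what changed: Replaces hash-based duplicate detection (seen-dict with early exit) by sort-then-scan: sort the 2-char prefixes and check that no two adjacent entries are equal.
import Mathlib
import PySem

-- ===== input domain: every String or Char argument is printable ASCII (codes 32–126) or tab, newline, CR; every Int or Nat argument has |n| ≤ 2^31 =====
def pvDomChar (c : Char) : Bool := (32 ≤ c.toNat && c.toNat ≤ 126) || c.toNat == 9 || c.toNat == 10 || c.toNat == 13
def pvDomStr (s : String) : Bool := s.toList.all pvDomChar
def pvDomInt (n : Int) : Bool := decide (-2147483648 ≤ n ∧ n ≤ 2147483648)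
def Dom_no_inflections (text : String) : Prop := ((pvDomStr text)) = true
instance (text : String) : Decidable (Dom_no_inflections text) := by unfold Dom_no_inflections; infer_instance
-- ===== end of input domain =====

-- B replaces A's hash-based seen-dict early-exit loop by sort-then-scan: sort the
-- 2-char prefixes and check that no two adjacent entries are equal (alternative algorithm).

-- ===== PORT A =====
-- the for-loop over words, carrying the 'seen' defaultdict (missing key ↦ False)
def noInfLoop (ws : List String) (seen : PySem.Dict String Bool) : Bool :=
  match ws with
  | [] => true
  | w :: rest =>
    if PySem.Str.len w = 1 then noInfLoop rest seen
    else
      if seen.getD (PySem.Str.slice w none (some 2)) false then false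
      else noInfLoop rest (seen.insert (PySem.Str.slice w none (some 2)) true)

def no_inflections (text : String) : Bool :=
  noInfLoop (PySem.Str.split₀ text) PySem.Dict.empty

-- ===== PORT B =====
def no_inflections_alt (text : String) : Bool :=
  let prefixes := PySem.List.sorted
      (((PySem.Str.split₀ text).filter (fun w => PySem.Str.len w ≠ 1)).map
        (fun w => PySem.Str.slice w none (some 2))) (fun x => x) false
  (prefixes.zip (PySem.List.slice prefixes (some 1) none)).all (fun pq => pq.1 ≠ pq.2)

-- ===== PRECONDITION & SPEC =====
def Spec_no_inflections (text : String) (out : Bool) : Prop := out = no_inflections_alt text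
instance (text : String) (out : Bool) : Decidable (Spec_no_inflections text out) := by unfold Spec_no_inflections; infer_instance

-- ===== CLAIM (what is proved, stated in full; the proofs are below) =====
def Claim_equal_no_inflections : Prop := ∀ (text : String), Dom_no_inflections text → Spec_no_inflections text (no_inflections text)

-- ===== LEMMAS AND PROOFS =====

-- A's loop returns true iff the prefixes of the remaining words are pairwise distinct
-- and none of them is already marked in 'seen'.
theorem noInfLoop_eq_true_iff (ws : List String) (seen : PySem.Dict String Bool) :
    noInfLoop ws seen = true ↔
      (((ws.filter (fun w => PySem.Str.len w ≠ 1)).map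
          (fun w => PySem.Str.slice w none (some 2))).Nodup ∧
       ∀ p ∈ (ws.filter (fun w => PySem.Str.len w ≠ 1)).map
          (fun w => PySem.Str.slice w none (some 2)), seen.getD p false = false) := by
  induction ws generalizing seen with
  | nil => simp [noInfLoop]
  | cons w rest ih =>
    simp only [noInfLoop]
    by_cases h1 : PySem.Str.len w = 1
    · rw [if_pos h1, List.filter_cons_of_neg (by rw [PySem.Str.len_eq] at h1; simpa using h1), ih]
    · rw [if_neg h1, List.filter_cons_of_pos (by rw [PySem.Str.len_eq] at h1; simpa using h1), List.map_cons]
      set p := PySem.Str.slice w none (some 2) with hp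
      by_cases h2 : seen.getD p false = true
      · rw [if_pos h2]
        simp only [Bool.false_eq_true, false_iff, not_and]
        intro _ hall
        have := hall p (List.mem_cons_self ..)
        rw [h2] at this; cases this
      · have h2' : seen.getD p false = false := by
          cases hv : seen.getD p false
          · rfl
          · exact absurd hv h2
        rw [if_neg h2, ih]
        simp only [List.nodup_cons, List.forall_mem_cons]
        constructor
        · rintro ⟨hnd, hall⟩
          refine ⟨⟨?_, hnd⟩, h2', ?_⟩
          · intro hmem
            have := hall p hmem
            rw [PySem.Dict.getD_insert] at this
            simp at this
          · intro q hq
            have := hall q hq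
            rw [PySem.Dict.getD_insert] at this
            split_ifs at this with he
            · exact this
        · rintro ⟨⟨hnp, hnd⟩, -, hall⟩
          refine ⟨hnd, ?_⟩
          intro q hq
          rw [PySem.Dict.getD_insert]
          split_ifs with he
          · exact absurd (he ▸ hq) hnp
          · exact hall q hq

-- the zip-with-tail adjacent check is IsChain (· ≠ ·)
theorem zip_tail_all_ne_iff_chain (l : List String) :
    ((l.zip (l.drop 1)).all (fun pq => pq.1 ≠ pq.2)) = true ↔ l.IsChain (· ≠ ·) := by
  induction l with
  | nil => simp
  | cons a rest ih =>
    cases rest with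
    | nil => simp
    | cons b t =>
      simp only [List.drop_one, List.tail_cons, List.zip_cons_cons, List.all_cons,
        Bool.and_eq_true, List.isChain_cons_cons, decide_eq_true_eq] at *
      rw [← ih]

-- combining two adjacent-chains pointwise
theorem isChain_and {α : Type} {R S : α → α → Prop} (l : List α)
    (h1 : l.IsChain R) (h2 : l.IsChain S) : l.IsChain (fun a b => R a b ∧ S a b) := by
  induction l with
  | nil => simp
  | cons a rest ih =>
    cases rest with
    | nil => simp
    | cons b t =>
      rw [List.isChain_cons_cons] at *
      exact ⟨⟨h1.1, h2.1⟩, ih h1.2 h2.2⟩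

-- on a (≤)-sorted list, adjacent-distinct is exactly Nodup
theorem chain_ne_iff_nodup_of_sorted (l : List String)
    (hs : l.Pairwise (fun a b => a ≤ b)) :
    l.IsChain (· ≠ ·) ↔ l.Nodup := by
  constructor
  · intro hc
    have hlt : l.IsChain (· < ·) :=
      (isChain_and l hs.isChain hc).imp (fun a b h => lt_of_le_of_ne h.1 h.2)
    exact (List.isChain_iff_pairwise.mp hlt).imp ne_of_lt
  · intro hn
    exact hn.isChain

-- ===== VERDICT (by name: the statement is the Claim_ definition above) =====
theorem no_inflections_spec : Claim_equal_no_inflections := by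
  intro text _
  unfold Spec_no_inflections no_inflections no_inflections_alt
  simp only []
  set xs := ((PySem.Str.split₀ text).filter (fun w => PySem.Str.len w ≠ 1)).map
      (fun w => PySem.Str.slice w none (some 2)) with hxs
  have hslice : PySem.List.slice (PySem.List.sorted xs (fun x => x) false) (some 1) none
      = (PySem.List.sorted xs (fun x => x) false).drop 1 := by
    rw [PySem.List.slice_from] <;> norm_num
  rw [hslice, Bool.eq_iff_iff, noInfLoop_eq_true_iff, zip_tail_all_ne_iff_chain,
      chain_ne_iff_nodup_of_sorted _ (PySem.List.sorted_pairwise xs (fun x => x)),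
      (PySem.List.sorted_perm xs (fun x => x) false).nodup_iff]
  simp [hxs, PySem.Str.len_eq, PySem.Dict.getD, PySem.Dict.empty, PySem.Dict.get?]
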